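-- pv_equiv track=rewrite | github.com/2024-scable/scable | script/etc/merge.py | filter_dependencies
-- ===== SOURCE A (Python) =====
-- from collections import deque
--
-- def filter_dependencies(package_map, dependency_map, reachable_libraries):
--     """
--     CVE가 있는 패키지와 그 종속성만 포함하도록 필터링
--     """
--     # CVE가 있는 패키지 식별
--     cve_packages = {ref for ref, data in package_map.items() if data["vulnerabilities"]}
--
--     # BFS 큐 초기화
--     queue = deque(cve_packages)
--     included_refs = set()
--
--     while queue:
--         current_ref = queue.popleft()
--         if current_ref in included_refs:
--             continue
--         included_refs.add(current_ref)
--         # 현재 패키지의 종속성 추가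
--         for dep_ref in dependency_map.get(current_ref, []):
--             if dep_ref not in included_refs:
--                 queue.append(dep_ref)
--     return included_refs
-- ===== SOURCE B (Python) =====
-- def filter_dependencies(package_map, dependency_map, reachable_libraries):
--     """
--     CVE가 있는 패키지와 그 종속성만 포함하도록 필터링
--
--     Fixed-point (chaotic) iteration instead of a BFS worklist: start from the
--     vulnerable packages and repeatedly sweep the WHOLE dependency map, adding
--     the dependencies of every already-included package, until one full sweep
--     adds nothing.  No queue, no per-node expansion order: the result is the
--     least set containing the CVE packages and closed under the dependency
--     edges, i.e. exactly the reachable set.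
--     """
--     included = {ref for ref, data in package_map.items() if data["vulnerabilities"]}
--     changed = True
--     while changed:
--         changed = False
--         for ref, deps in dependency_map.items():
--             if ref in included:
--                 for dep in deps:
--                     if dep not in included:
--                         included.add(dep)
--                         changed = True
--     return included
-- ===== Notes on version B (the rewrite author's own statement) =====
-- stated objective: alternative
-- what changed: Replaces the BFS worklist (deque, popleft, skip-if-included, per-node dependency expansion) with a round-based fixed-point iteration that repeatedly sweeps the entire dependency map, adding the dependencies of every already-included package, until a full sweep adds nothing; both compute the least set containing the CVE packages and closed under dependency edges, i.e. the same reachable set.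
import Mathlib
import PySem

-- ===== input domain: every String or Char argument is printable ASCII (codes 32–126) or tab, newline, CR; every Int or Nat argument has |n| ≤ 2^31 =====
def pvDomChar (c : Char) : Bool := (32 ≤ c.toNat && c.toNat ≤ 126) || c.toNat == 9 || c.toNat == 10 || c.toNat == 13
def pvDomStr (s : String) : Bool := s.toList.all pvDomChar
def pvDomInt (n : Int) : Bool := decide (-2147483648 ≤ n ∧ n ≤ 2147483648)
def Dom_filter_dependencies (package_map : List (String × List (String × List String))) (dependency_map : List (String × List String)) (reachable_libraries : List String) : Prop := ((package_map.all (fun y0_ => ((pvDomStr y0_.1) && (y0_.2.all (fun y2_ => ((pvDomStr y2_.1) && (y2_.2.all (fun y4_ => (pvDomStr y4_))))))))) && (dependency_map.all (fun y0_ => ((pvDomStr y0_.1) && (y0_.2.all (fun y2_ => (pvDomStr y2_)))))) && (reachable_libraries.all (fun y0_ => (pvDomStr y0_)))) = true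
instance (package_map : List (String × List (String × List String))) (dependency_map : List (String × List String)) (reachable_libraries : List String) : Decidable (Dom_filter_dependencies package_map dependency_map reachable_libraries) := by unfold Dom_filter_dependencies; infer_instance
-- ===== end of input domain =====

-- A = iterative BFS over a deque with a visited set; B = round-based fixed-point iteration
-- sweeping the whole dependency map until a sweep adds nothing (objective: alternative —
-- a genuinely different closure algorithm, no worklist). Python returns a SET, whose
-- iteration order is not modelled: both ports return its elements sorted (an
-- order-independent representation of the same set); outputs are compared as sets.


-- ===== PORT A =====
-- helper for the termination measures of both loops (a Nodup subset is no longer than univ)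
theorem pvNodupSubsetLen {l₁ l₂ : List String} (h : l₁.Nodup) (hs : ∀ x ∈ l₁, x ∈ l₂) :
    l₁.length ≤ l₂.length := (List.subperm_of_subset h hs).length_le

-- the roots: {ref for ref, data in package_map.items() if data["vulnerabilities"]}
def pvRoots (package_map : List (String × List (String × List String))) : List String :=
  ((PySem.Dict.ofList package_map).items.filter
    (fun p => !((PySem.Dict.ofList p.2).getD "vulnerabilities" []).isEmpty)).map Prod.fst

-- elements fetched with .get(k, []) come from the dict's values
theorem pvMemGetDFlatten {dm : PySem.Dict String (List String)} {k y : String}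
    (h : y ∈ dm.getD k []) : y ∈ dm.values.flatten := by
  rw [PySem.Dict.getD_eq_get?_getD] at h
  cases hget : dm.get? k with
  | none => rw [hget] at h; simp at h
  | some v =>
    rw [hget] at h
    refine List.mem_flatten.2 ⟨v, ?_, h⟩
    have := PySem.Dict.mem_items_of_get?_eq_some dm hget
    simp only [PySem.Dict.values]
    exact List.mem_map.2 ⟨(k, v), this, rfl⟩

-- A's while-loop: FIFO queue, dequeue, skip if already included, enqueue unseen deps.
-- univ is a ghost bound used only by the termination measure; hq/hnd/hinc are the
-- invariants that justify it (Prop arguments, no computational content).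
def pvBfsA (dm : PySem.Dict String (List String)) (univ : List String)
    (hu : ∀ y ∈ dm.values.flatten, y ∈ univ)
    (queue : List String) (inc : PySem.Set String)
    (hq : ∀ x ∈ queue, x ∈ univ) (hnd : inc.Nodup) (hinc : ∀ x ∈ inc, x ∈ univ) :
    List String :=
  match queue with
  | [] => inc
  | x :: t =>
    if hx : x ∈ inc then
      pvBfsA dm univ hu t inc (fun y hy => hq y (List.mem_cons_of_mem x hy)) hnd hinc
    else
      let inc' := PySem.Set.add inc x
      let ds := (dm.getD x []).filter (fun d => !(PySem.Set.contains inc' d))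
      pvBfsA dm univ hu (t ++ ds) inc'
        (by
          intro y hy
          rcases List.mem_append.1 hy with h1 | h1
          · exact hq y (List.mem_cons_of_mem x h1)
          · have h2 : y ∈ List.filter (fun d => !(PySem.Set.contains inc' d)) (dm.getD x []) := h1
            exact hu y (pvMemGetDFlatten (List.mem_filter.1 h2).1))
        (PySem.Set.nodup_add inc x hnd)
        (by
          intro y hy
          have hy' : y ∈ PySem.Set.add inc x := hy
          rw [PySem.Set.add_of_not_mem hx] at hy'
          rcases List.mem_append.1 hy' with h1 | h1
          · exact hinc y h1
          · rcases List.mem_singleton.1 h1 with rfl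
            exact hq y List.mem_cons_self)
  termination_by (univ.length + 1 - inc.length, queue.length)
  decreasing_by
  · exact Prod.Lex.right _ (Nat.lt_succ_self _)
  · apply Prod.Lex.left
    have hle : inc.length ≤ univ.length := pvNodupSubsetLen hnd hinc
    have : (PySem.Set.add inc x).length = inc.length + 1 := by
      simp [PySem.Set.add_of_not_mem hx]
    omega

def filter_dependencies (package_map : List (String × List (String × List String))) (dependency_map : List (String × List String)) (reachable_libraries : List String) : List String :=
  let dm := PySem.Dict.ofList dependency_map
  let cve_packages : PySem.Set String := PySem.Set.ofList (pvRoots package_map)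
  let univ := cve_packages ++ dm.values.flatten
  -- the returned Python SET, rendered in sorted order (its iteration order is unmodelled)
  PySem.List.sorted
    (pvBfsA dm univ (fun y hy => List.mem_append.2 (Or.inr hy)) cve_packages PySem.Set.empty
      (fun x hx => List.mem_append.2 (Or.inl hx)) List.nodup_nil (fun x hx => absurd hx (List.not_mem_nil)))
    (fun x => x) false

-- ===== PORT B =====
-- innermost loop body: 'if dep not in included: included.add(dep); changed = True'
def pvAdd1 (st : PySem.Set String × Bool) (d : String) : PySem.Set String × Bool :=
  if PySem.Set.contains st.1 d then st else (PySem.Set.add st.1 d, true)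

-- one item of the sweep: 'if ref in included: for dep in deps: …'
def pvStep (st : PySem.Set String × Bool) (item : String × List String) : PySem.Set String × Bool :=
  if PySem.Set.contains st.1 item.1 then item.2.foldl pvAdd1 st else st

-- facts about one sweep, needed by pvFix's termination measure
theorem pvInner_fst (deps : List String) (st : PySem.Set String × Bool) :
    (deps.foldl pvAdd1 st).1 = PySem.Set.update st.1 deps := by
  induction deps generalizing st with
  | nil => rfl
  | cons d t ih =>
    rw [PySem.Set.update_cons]
    simp only [List.foldl_cons, pvAdd1]
    by_cases h : d ∈ st.1
    · rw [if_pos (by simpa [PySem.Set.contains_iff] using h), PySem.Set.add_of_mem h]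
      exact ih st
    · rw [if_neg (by simpa [PySem.Set.contains_iff] using h)]
      exact ih (PySem.Set.add st.1 d, true)

theorem pvInner_snd_true (deps : List String) (st : PySem.Set String × Bool) (h : st.2 = true) :
    (deps.foldl pvAdd1 st).2 = true := by
  induction deps generalizing st with
  | nil => exact h
  | cons d t ih =>
    simp only [List.foldl_cons, pvAdd1]
    by_cases hc : PySem.Set.contains st.1 d
    · rw [if_pos hc]; exact ih st h
    · rw [if_neg hc]; exact ih _ rfl

theorem pvInner_snd (deps : List String) (st : PySem.Set String × Bool) :
    (deps.foldl pvAdd1 st).2 = (st.2 || !deps.all (fun d => PySem.Set.contains st.1 d)) := by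
  induction deps generalizing st with
  | nil => simp
  | cons d t ih =>
    simp only [List.foldl_cons, pvAdd1, List.all_cons]
    by_cases hc : PySem.Set.contains st.1 d = true
    · rw [if_pos hc, ih st, hc]
      have : ∀ x, PySem.Set.contains (st.1) x = PySem.Set.contains st.1 x := fun _ => rfl
      simp
    · rw [if_neg hc]
      rw [pvInner_snd_true t _ rfl]
      simp [Bool.not_eq_true] at hc
      simp [hc]

theorem pvUpdate_len_le (s : PySem.Set String) (xs : List String) :
    s.length ≤ (PySem.Set.update s xs).length := by
  rw [PySem.Set.update_eq_append_filter]; simp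

theorem pvUpdate_len_lt (s : PySem.Set String) (xs : List String)
    (h : xs.all (fun d => PySem.Set.contains s d) = false) :
    s.length < (PySem.Set.update s xs).length := by
  rw [PySem.Set.update_eq_append_filter, List.length_append]
  have : ∃ d ∈ xs, ¬ (PySem.Set.contains s d = true) := by simpa [List.all_eq_true] using h
  obtain ⟨d, hd, hdc⟩ := this
  have hmem : d ∈ (PySem.Set.ofList xs).filter (fun y => !(PySem.Set.contains s y)) :=
    List.mem_filter.2 ⟨(PySem.Set.mem_ofList xs d).2 hd, by simpa using hdc⟩
  have : 0 < ((PySem.Set.ofList xs).filter (fun y => !(PySem.Set.contains s y))).length :=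
    List.length_pos_of_mem hmem
  omega

theorem pvOuter_len_le (items : List (String × List String)) (st : PySem.Set String × Bool) :
    st.1.length ≤ (items.foldl pvStep st).1.length := by
  induction items generalizing st with
  | nil => exact le_refl _
  | cons item t ih =>
    simp only [List.foldl_cons, pvStep]
    by_cases hc : PySem.Set.contains st.1 item.1
    · rw [if_pos hc]
      refine le_trans ?_ (ih (item.2.foldl pvAdd1 st))
      rw [pvInner_fst]; exact pvUpdate_len_le _ _
    · rw [if_neg hc]; exact ih st

theorem pvOuter_growth (items : List (String × List String)) (st : PySem.Set String × Bool)
    (h : (items.foldl pvStep st).2 = true) :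
    st.2 = true ∨ st.1.length < (items.foldl pvStep st).1.length := by
  induction items generalizing st with
  | nil => exact Or.inl h
  | cons item t ih =>
    simp only [List.foldl_cons, pvStep] at h ⊢
    by_cases hc : PySem.Set.contains st.1 item.1
    · rw [if_pos hc] at h ⊢
      rcases ih _ h with h1 | h1
      · rw [pvInner_snd] at h1
        rcases Bool.or_eq_true_iff.1 h1 with h2 | h2
        · exact Or.inl h2
        · refine Or.inr (lt_of_lt_of_le ?_ (pvOuter_len_le t _))
          rw [pvInner_fst]
          exact pvUpdate_len_lt st.1 item.2 (by simpa using h2)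
      · refine Or.inr (lt_of_le_of_lt ?_ h1)
        rw [pvInner_fst]; exact pvUpdate_len_le _ _
    · rw [if_neg hc] at h ⊢; exact ih st h

theorem pvOuter_nodup (items : List (String × List String)) (st : PySem.Set String × Bool)
    (h : st.1.Nodup) : (items.foldl pvStep st).1.Nodup := by
  induction items generalizing st with
  | nil => exact h
  | cons item t ih =>
    simp only [List.foldl_cons, pvStep]
    by_cases hc : PySem.Set.contains st.1 item.1
    · rw [if_pos hc]
      refine ih _ ?_
      rw [pvInner_fst]
      exact PySem.Set.nodup_update _ _ h
    · rw [if_neg hc]; exact ih st h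

theorem pvOuter_univ (items : List (String × List String)) (st : PySem.Set String × Bool)
    (univ : List String) (hH : ∀ item ∈ items, ∀ d ∈ item.2, d ∈ univ)
    (h : ∀ x ∈ st.1, x ∈ univ) : ∀ x ∈ (items.foldl pvStep st).1, x ∈ univ := by
  induction items generalizing st with
  | nil => exact h
  | cons item t ih =>
    simp only [List.foldl_cons, pvStep]
    by_cases hc : PySem.Set.contains st.1 item.1
    · rw [if_pos hc]
      refine ih _ (fun i hi => hH i (List.mem_cons_of_mem _ hi)) ?_
      intro x hx
      rw [pvInner_fst] at hx
      rcases (PySem.Set.mem_update st.1 item.2 x).1 hx with h1 | h1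
      · exact h x h1
      · exact hH item List.mem_cons_self x h1
    · rw [if_neg hc]; exact ih st (fun i hi => hH i (List.mem_cons_of_mem _ hi)) h

-- B's outer while-loop: sweep until a sweep reports no change; ghost univ as in pvBfsA.
def pvFix (dm : PySem.Dict String (List String)) (univ : List String)
    (hu : ∀ item ∈ dm.items, ∀ d ∈ item.2, d ∈ univ)
    (inc : PySem.Set String) (hnd : inc.Nodup) (hinc : ∀ x ∈ inc, x ∈ univ) : List String :=
  let r := dm.items.foldl pvStep (inc, false)
  if hr : r.2 = true then
    pvFix dm univ hu r.1 (pvOuter_nodup _ _ hnd) (pvOuter_univ _ _ univ hu hinc)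
  else r.1
  termination_by univ.length + 1 - inc.length
  decreasing_by
    have hlt : inc.length < (dm.items.foldl pvStep (inc, false)).1.length := by
      rcases pvOuter_growth dm.items (inc, false) hr with h1 | h1
      · exact absurd h1 (by simp)
      · exact h1
    have hle : (dm.items.foldl pvStep (inc, false)).1.length ≤ univ.length :=
      pvNodupSubsetLen (pvOuter_nodup _ _ hnd) (pvOuter_univ _ _ univ hu hinc)
    omega

def filter_dependencies_alt (package_map : List (String × List (String × List String))) (dependency_map : List (String × List String)) (reachable_libraries : List String) : List String :=
  let dm := PySem.Dict.ofList dependency_map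
  let included : PySem.Set String := PySem.Set.ofList (pvRoots package_map)
  let univ := included ++ dm.values.flatten
  -- the returned Python SET, rendered in sorted order (its iteration order is unmodelled)
  PySem.List.sorted
    (pvFix dm univ
      (fun item hi d hd => List.mem_append.2 (Or.inr (List.mem_flatten.2
        ⟨item.2, List.mem_map.2 ⟨item, hi, rfl⟩, hd⟩)))
      included (PySem.Set.nodup_ofList _) (fun x hx => List.mem_append.2 (Or.inl hx)))
    (fun x => x) false

-- ===== PRECONDITION & SPEC =====
-- Pre_ excludes exactly the inputs where Python A raises KeyError: some package's data
-- dict lacks the key "vulnerabilities".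
def Pre_filter_dependencies (package_map : List (String × List (String × List String))) (dependency_map : List (String × List String)) (reachable_libraries : List String) : Prop :=
  ∀ p ∈ (PySem.Dict.ofList package_map).items, "vulnerabilities" ∈ p.2.map Prod.fst
instance (package_map : List (String × List (String × List String))) (dependency_map : List (String × List String)) (reachable_libraries : List String) : Decidable (Pre_filter_dependencies package_map dependency_map reachable_libraries) := by unfold Pre_filter_dependencies; infer_instance

def pvWitness_filter_dependencies : (List (String × List (String × List String))) × (List (String × List String)) × List String :=
  ([("a", [("vulnerabilities", ["CVE-1"])]), ("b", [("vulnerabilities", [])])],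
   [("a", ["b", "c"]), ("c", ["a"])], [])

def Spec_filter_dependencies (package_map : List (String × List (String × List String))) (dependency_map : List (String × List String)) (reachable_libraries : List String) (out : List String) : Prop := out = filter_dependencies_alt package_map dependency_map reachable_libraries
instance (package_map : List (String × List (String × List String))) (dependency_map : List (String × List String)) (reachable_libraries : List String) (out : List String) : Decidable (Spec_filter_dependencies package_map dependency_map reachable_libraries out) := by unfold Spec_filter_dependencies; infer_instance

-- ===== CLAIM (what is proved, stated in full; the proofs are below) =====
def Claim_equal_filter_dependencies : Prop := ∀ (package_map : List (String × List (String × List String))) (dependency_map : List (String × List String)) (reachable_libraries : List String), Dom_filter_dependencies package_map dependency_map reachable_libraries → Pre_filter_dependencies package_map dependency_map reachable_libraries → Spec_filter_dependencies package_map dependency_map reachable_libraries (filter_dependencies package_map dependency_map reachable_libraries)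

-- ===== LEMMAS AND PROOFS =====

-- reachability from the roots along dependency edges: what BOTH algorithms compute
inductive pvReach (dm : PySem.Dict String (List String)) (roots : List String) : String → Prop
  | root (x : String) : x ∈ roots → pvReach dm roots x
  | step (x y : String) : pvReach dm roots x → y ∈ dm.getD x [] → pvReach dm roots y

-- ---- A's BFS computes the reachable set ----
theorem pvBfsA_mem_inc (dm : PySem.Dict String (List String)) (univ : List String)
    (hu : ∀ y ∈ dm.values.flatten, y ∈ univ) (queue : List String) (inc : PySem.Set String)
    (hq : ∀ x ∈ queue, x ∈ univ) (hnd : inc.Nodup) (hinc : ∀ x ∈ inc, x ∈ univ) :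
    ∀ x, x ∈ inc → x ∈ pvBfsA dm univ hu queue inc hq hnd hinc := by
  fun_induction pvBfsA dm univ hu queue inc hq hnd hinc
  · exact fun x hx => hx
  · rename_i inc hnd hinc x t hq1 hx hq2 ih
    exact fun z hz => ih z hz
  · rename_i inc hnd hinc x t hq1 hx inc' ds hq2 ih
    exact fun z hz => ih z ((PySem.Set.mem_add inc x z).2 (Or.inl hz))


theorem pvBfsA_mem_queue (dm : PySem.Dict String (List String)) (univ : List String)
    (hu : ∀ y ∈ dm.values.flatten, y ∈ univ) (queue : List String) (inc : PySem.Set String)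
    (hq : ∀ x ∈ queue, x ∈ univ) (hnd : inc.Nodup) (hinc : ∀ x ∈ inc, x ∈ univ) :
    ∀ x, x ∈ queue → x ∈ pvBfsA dm univ hu queue inc hq hnd hinc := by
  fun_induction pvBfsA dm univ hu queue inc hq hnd hinc
  · exact fun x hx => absurd hx (List.not_mem_nil)
  · rename_i inc hnd hinc x t hq1 hx hq2 ih
    intro z hz
    rcases List.mem_cons.1 hz with rfl | hz
    · exact pvBfsA_mem_inc _ _ _ _ _ _ _ _ z hx
    · exact ih z hz
  · rename_i inc hnd hinc x t hq1 hx inc' ds hq2 ih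
    intro z hz
    rcases List.mem_cons.1 hz with rfl | hz
    · exact pvBfsA_mem_inc _ _ _ _ _ _ _ _ z ((PySem.Set.mem_add inc z z).2 (Or.inr rfl))
    · exact ih z (List.mem_append.2 (Or.inl hz))


theorem pvBfsA_closed (dm : PySem.Dict String (List String)) (univ : List String)
    (hu : ∀ y ∈ dm.values.flatten, y ∈ univ) (queue : List String) (inc : PySem.Set String)
    (hq : ∀ x ∈ queue, x ∈ univ) (hnd : inc.Nodup) (hinc : ∀ x ∈ inc, x ∈ univ)
    (hinv : ∀ z ∈ inc, ∀ d ∈ dm.getD z [], d ∈ inc ∨ d ∈ queue) :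
    ∀ z ∈ pvBfsA dm univ hu queue inc hq hnd hinc, ∀ d ∈ dm.getD z [],
      d ∈ pvBfsA dm univ hu queue inc hq hnd hinc := by
  fun_induction pvBfsA dm univ hu queue inc hq hnd hinc
  · rename_i inc hnd hinc hq1 hq2
    intro z hz d hd
    rcases hinv z hz d hd with h | h
    · exact h
    · exact absurd h (List.not_mem_nil)
  · rename_i inc hnd hinc x t hq1 hx hq2 ih
    refine ih ?_
    intro z hz d hd
    rcases hinv z hz d hd with h | h
    · exact Or.inl h
    · rcases List.mem_cons.1 h with rfl | h
      · exact Or.inl hx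
      · exact Or.inr h
  · rename_i inc hnd hinc x t hq1 hx inc' ds hq2 ih
    refine ih ?_
    intro z hz d hd
    rcases (PySem.Set.mem_add inc x z).1 hz with hz1 | rfl
    · rcases hinv z hz1 d hd with h | h
      · exact Or.inl ((PySem.Set.mem_add inc x d).2 (Or.inl h))
      · rcases List.mem_cons.1 h with rfl | h
        · exact Or.inl ((PySem.Set.mem_add inc d d).2 (Or.inr rfl))
        · exact Or.inr (List.mem_append.2 (Or.inl h))
    · by_cases hdc : d ∈ inc'
      · exact Or.inl hdc
      · refine Or.inr (List.mem_append.2 (Or.inr ?_))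
        exact List.mem_filter.2 ⟨hd, by simpa [PySem.Set.contains_iff] using hdc⟩


theorem pvBfsA_sound (dm : PySem.Dict String (List String)) (univ : List String)
    (hu : ∀ y ∈ dm.values.flatten, y ∈ univ) (queue : List String) (inc : PySem.Set String)
    (hq : ∀ x ∈ queue, x ∈ univ) (hnd : inc.Nodup) (hinc : ∀ x ∈ inc, x ∈ univ)
    (P : String → Prop) (hP : ∀ x y, P x → y ∈ dm.getD x [] → P y)
    (h1 : ∀ x ∈ inc, P x) (h2 : ∀ q ∈ queue, P q) :
    ∀ x ∈ pvBfsA dm univ hu queue inc hq hnd hinc, P x := by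
  fun_induction pvBfsA dm univ hu queue inc hq hnd hinc
  · exact fun x hx => h1 x hx
  · rename_i inc hnd hinc x t hq1 hx hq2 ih
    exact ih h1 (fun q hq' => h2 q (List.mem_cons_of_mem x hq'))
  · rename_i inc hnd hinc x t hq1 hx inc' ds hq2 ih
    refine ih ?_ ?_
    · intro z hz
      rcases (PySem.Set.mem_add inc x z).1 hz with h | rfl
      · exact h1 z h
      · exact h2 z List.mem_cons_self
    · intro q hq'
      rcases List.mem_append.1 hq' with h | h
      · exact h2 q (List.mem_cons_of_mem x h)
      · have hq2' : q ∈ List.filter (fun d => !(PySem.Set.contains inc' d)) (dm.getD x []) := h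
        exact hP x q (h2 x List.mem_cons_self) (List.mem_filter.1 hq2').1


theorem pvBfsA_nodup (dm : PySem.Dict String (List String)) (univ : List String)
    (hu : ∀ y ∈ dm.values.flatten, y ∈ univ) (queue : List String) (inc : PySem.Set String)
    (hq : ∀ x ∈ queue, x ∈ univ) (hnd : inc.Nodup) (hinc : ∀ x ∈ inc, x ∈ univ) :
    (pvBfsA dm univ hu queue inc hq hnd hinc).Nodup := by
  fun_induction pvBfsA dm univ hu queue inc hq hnd hinc
  · rename_i inc hnd hinc hq1 hq2
    exact hnd
  · rename_i inc hnd hinc x t hq1 hx hq2 ih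
    exact ih
  · rename_i inc hnd hinc x t hq1 hx inc' ds hq2 ih
    exact ih


-- ---- B's fixed-point iteration computes the reachable set ----
theorem pvOuter_mem (items : List (String × List String)) (st : PySem.Set String × Bool) :
    ∀ x ∈ st.1, x ∈ (items.foldl pvStep st).1 := by
  induction items generalizing st with
  | nil => exact fun x hx => hx
  | cons item t ih =>
    intro x hx
    simp only [List.foldl_cons, pvStep]
    by_cases hc : PySem.Set.contains st.1 item.1
    · rw [if_pos hc]
      refine ih _ x ?_
      rw [pvInner_fst]
      exact (PySem.Set.mem_update st.1 item.2 x).2 (Or.inl hx)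
    · rw [if_neg hc]; exact ih st x hx


theorem pvOuter_sound (items : List (String × List String)) (st : PySem.Set String × Bool)
    (P : String → Prop) (hH : ∀ item ∈ items, ∀ d ∈ item.2, P item.1 → P d)
    (h : ∀ x ∈ st.1, P x) : ∀ x ∈ (items.foldl pvStep st).1, P x := by
  induction items generalizing st with
  | nil => exact h
  | cons item t ih =>
    simp only [List.foldl_cons, pvStep]
    by_cases hc : PySem.Set.contains st.1 item.1
    · rw [if_pos hc]
      refine ih _ (fun i hi => hH i (List.mem_cons_of_mem _ hi)) ?_
      intro x hx
      rw [pvInner_fst] at hx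
      rcases (PySem.Set.mem_update st.1 item.2 x).1 hx with h1 | h1
      · exact h x h1
      · exact hH item List.mem_cons_self x h1
          (h item.1 ((PySem.Set.contains_iff st.1 item.1).1 hc))
    · rw [if_neg hc]; exact ih st (fun i hi => hH i (List.mem_cons_of_mem _ hi)) h


theorem pvOuter_snd_true (items : List (String × List String)) (st : PySem.Set String × Bool)
    (h : st.2 = true) : (items.foldl pvStep st).2 = true := by
  induction items generalizing st with
  | nil => exact h
  | cons item t ih =>
    simp only [List.foldl_cons, pvStep]
    by_cases hc : PySem.Set.contains st.1 item.1
    · rw [if_pos hc]; exact ih _ (pvInner_snd_true item.2 st h)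
    · rw [if_neg hc]; exact ih st h

theorem pvUpdate_all (s : PySem.Set String) (xs : List String)
    (h : xs.all (fun d => PySem.Set.contains s d) = true) : PySem.Set.update s xs = s := by
  rw [PySem.Set.update_eq_append_filter]
  have : (PySem.Set.ofList xs).filter (fun y => !(PySem.Set.contains s y)) = [] := by
    rw [List.filter_eq_nil_iff]
    intro y hy
    have : PySem.Set.contains s y = true :=
      List.all_eq_true.1 h y ((PySem.Set.mem_ofList xs y).1 hy)
    simp [this]
    exact (PySem.Set.contains_iff s y).1 this
  rw [this, List.append_nil]

theorem pvOuter_fix (items : List (String × List String)) (st : PySem.Set String × Bool)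
    (h : (items.foldl pvStep st).2 = false) :
    (items.foldl pvStep st).1 = st.1 ∧
      ∀ item ∈ items, item.1 ∈ st.1 → ∀ d ∈ item.2, d ∈ st.1 := by
  induction items generalizing st with
  | nil => exact ⟨rfl, by intro i hi; exact absurd hi (List.not_mem_nil)⟩
  | cons item t ih =>
    simp only [List.foldl_cons, pvStep] at h ⊢
    by_cases hc : PySem.Set.contains st.1 item.1
    · rw [if_pos hc] at h ⊢
      have hflag : (item.2.foldl pvAdd1 st).2 = false := by
        by_contra hf
        rw [pvOuter_snd_true t _ (by simpa using hf)] at h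
        simp at h
      rw [pvInner_snd] at hflag
      have hall : item.2.all (fun d => PySem.Set.contains st.1 d) = true := by
        rcases Bool.or_eq_false_iff.1 hflag with ⟨_, h2⟩
        simpa using h2
      have heq1 : (item.2.foldl pvAdd1 st).1 = st.1 := by
        rw [pvInner_fst]; exact pvUpdate_all st.1 item.2 hall
      obtain ⟨heq, hcl⟩ := ih _ h
      rw [heq1] at heq hcl
      refine ⟨heq, ?_⟩
      intro i hi hmem d hd
      rcases List.mem_cons.1 hi with rfl | hi
      · exact (PySem.Set.contains_iff st.1 d).1 (List.all_eq_true.1 hall d hd)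
      · exact hcl i hi hmem d hd
    · rw [if_neg hc] at h ⊢
      obtain ⟨heq, hcl⟩ := ih st h
      refine ⟨heq, ?_⟩
      intro i hi hmem d hd
      rcases List.mem_cons.1 hi with rfl | hi
      · exact absurd ((PySem.Set.contains_iff st.1 i.1).2 hmem) (by simpa using hc)
      · exact hcl i hi hmem d hd

theorem pvFix_mem (dm : PySem.Dict String (List String)) (univ : List String)
    (hu : ∀ item ∈ dm.items, ∀ d ∈ item.2, d ∈ univ) (inc : PySem.Set String)
    (hnd : inc.Nodup) (hinc : ∀ x ∈ inc, x ∈ univ) :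
    ∀ x ∈ inc, x ∈ pvFix dm univ hu inc hnd hinc := by
  fun_induction pvFix dm univ hu inc hnd hinc with
  | case1 inc hnd hinc r hr ih =>
    exact fun x hx => ih x (pvOuter_mem dm.items (inc, false) x hx)
  | case2 inc hnd hinc r hr =>
    exact fun x hx => pvOuter_mem dm.items (inc, false) x hx

theorem pvFix_sound (dm : PySem.Dict String (List String)) (univ : List String)
    (hu : ∀ item ∈ dm.items, ∀ d ∈ item.2, d ∈ univ) (inc : PySem.Set String)
    (hnd : inc.Nodup) (hinc : ∀ x ∈ inc, x ∈ univ) (hk : dm.keys.Nodup)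
    (P : String → Prop) (hP : ∀ x y, P x → y ∈ dm.getD x [] → P y)
    (h : ∀ x ∈ inc, P x) : ∀ x ∈ pvFix dm univ hu inc hnd hinc, P x := by
  have hH : ∀ item ∈ dm.items, ∀ d ∈ item.2, P item.1 → P d := by
    intro item hi d hd hp
    have : dm.getD item.1 [] = item.2 := PySem.Dict.getD_of_mem_items dm hi hk []
    exact hP item.1 d hp (this ▸ hd)
  fun_induction pvFix dm univ hu inc hnd hinc with
  | case1 inc hnd hinc r hr ih =>
    exact ih (pvOuter_sound dm.items (inc, false) P hH h)
  | case2 inc hnd hinc r hr =>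
    exact pvOuter_sound dm.items (inc, false) P hH h

theorem pvFix_closed (dm : PySem.Dict String (List String)) (univ : List String)
    (hu : ∀ item ∈ dm.items, ∀ d ∈ item.2, d ∈ univ) (inc : PySem.Set String)
    (hnd : inc.Nodup) (hinc : ∀ x ∈ inc, x ∈ univ) (hk : dm.keys.Nodup) :
    ∀ z ∈ pvFix dm univ hu inc hnd hinc, ∀ d ∈ dm.getD z [],
      d ∈ pvFix dm univ hu inc hnd hinc := by
  fun_induction pvFix dm univ hu inc hnd hinc with
  | case1 inc hnd hinc r hr ih => exact ih
  | case2 inc hnd hinc r hr =>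
    obtain ⟨heq, hcl⟩ := pvOuter_fix dm.items (inc, false) (by simpa using hr)
    intro z hz d hd
    rw [heq] at hz ⊢
    cases hget : dm.get? z with
    | none =>
      rw [PySem.Dict.getD_of_get?_eq_none dm [] hget] at hd
      exact absurd hd (List.not_mem_nil)
    | some v =>
      have hitem : (z, v) ∈ dm.items := PySem.Dict.mem_items_of_get?_eq_some dm hget
      have : dm.getD z [] = v := PySem.Dict.getD_of_get?_eq_some dm [] hget
      exact hcl (z, v) hitem hz d (this ▸ hd)

theorem pvFix_nodup (dm : PySem.Dict String (List String)) (univ : List String)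
    (hu : ∀ item ∈ dm.items, ∀ d ∈ item.2, d ∈ univ) (inc : PySem.Set String)
    (hnd : inc.Nodup) (hinc : ∀ x ∈ inc, x ∈ univ) :
    (pvFix dm univ hu inc hnd hinc).Nodup := by
  fun_induction pvFix dm univ hu inc hnd hinc with
  | case1 inc hnd hinc r hr ih => exact ih
  | case2 inc hnd hinc r hr => exact pvOuter_nodup dm.items (inc, false) hnd

-- ===== VERDICT (by name: the statement is the Claim_ definition above) =====
theorem filter_dependencies_spec : Claim_equal_filter_dependencies := by
  intro package_map dependency_map reachable_libraries _ _
  unfold Spec_filter_dependencies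
  simp only [filter_dependencies, filter_dependencies_alt]
  refine PySem.List.sorted_eq_sorted_of_perm _ _ _ Function.injective_id ?_
  refine (List.perm_ext_iff_of_nodup (pvBfsA_nodup _ _ _ _ _ _ _ _) (pvFix_nodup _ _ _ _ _ _)).2 ?_
  intro a
  constructor
  · intro ha
    have hre : pvReach (PySem.Dict.ofList dependency_map) (pvRoots package_map) a :=
      pvBfsA_sound _ _ _ _ _ _ _ _ _ (fun x y hx hy => pvReach.step x y hx hy)
        (fun x hx => absurd hx (List.not_mem_nil))
        (fun q hq => pvReach.root q ((PySem.Set.mem_ofList _ q).1 hq)) a ha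
    clear ha
    induction hre with
    | root x hx => exact pvFix_mem _ _ _ _ _ _ x ((PySem.Set.mem_ofList _ x).2 hx)
    | step x y hx hy ih =>
      exact pvFix_closed _ _ _ _ _ _ (PySem.Dict.nodup_keys_ofList _) x ih y hy
  · intro ha
    have hre : pvReach (PySem.Dict.ofList dependency_map) (pvRoots package_map) a :=
      pvFix_sound _ _ _ _ _ _ (PySem.Dict.nodup_keys_ofList _) _
        (fun x y hx hy => pvReach.step x y hx hy)
        (fun x hx => pvReach.root x ((PySem.Set.mem_ofList _ x).1 hx)) a ha
    clear ha
    induction hre with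
    | root x hx => exact pvBfsA_mem_queue _ _ _ _ _ _ _ _ x ((PySem.Set.mem_ofList _ x).2 hx)
    | step x y hx hy ih =>
      exact pvBfsA_closed _ _ _ _ _ _ _ _
        (fun z hz => absurd hz (List.not_mem_nil)) x ih y hy
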